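-- pv_equiv track=rewrite | github.com/JunInMay/journey-to-baekjoon | baekjoon/baekjoon_1783.py | get_visit
-- ===== SOURCE A (Python) =====
-- def get_visit(V, H):
--
--     cnt = 1
--     H -= 1
--     # 세로가 1칸(어떠한 움직임도 불가능함)
--     if V <= 1:
--         return cnt
--     # 세로가 2칸(2, 3번 움직임만 가능 = 최대 이동 횟수는 3회임)
--     elif V <= 2:
--         order = 2
--         for i in range(3):
--             H -= order
--             cnt += 1
--             if H < 0:
--                 cnt -= 1
--                 break
--     # 세로가 3칸 이상
--     else:
--         # 가로가 부족할 경우 1, 4번 움직임만, 최대 이동 횟수는 3회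
--         if H <= 5:
--             order = 1
--             for i in range(3):
--                 H -= order
--                 cnt += 1
--                 if H < 0:
--                     cnt -= 1
--                     break
--         else:
--             cnt += (H-4) + 2
--
--     return cnt
-- ===== SOURCE B (Python) =====
-- def get_visit(V, H):
--     # closed-form: each bounded loop of A replaced by pure arithmetic
--     H -= 1
--     if V <= 1:
--         return 1
--     if V <= 2:
--         return 1 + min(3, max(0, H // 2))
--     if H <= 5:
--         return 1 + min(3, max(0, H))
--     return H - 1
-- ===== Notes on version B (the rewrite author's own statement) =====
-- stated objective: simpler
-- what changed: Each of A's bounded break-loops (up to 3 iterations subtracting a stride) is replaced by its arithmetic closed form 1 + min(3, max(0, H//stride)), leaving only branch arithmetic and no loops.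
import Mathlib
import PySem

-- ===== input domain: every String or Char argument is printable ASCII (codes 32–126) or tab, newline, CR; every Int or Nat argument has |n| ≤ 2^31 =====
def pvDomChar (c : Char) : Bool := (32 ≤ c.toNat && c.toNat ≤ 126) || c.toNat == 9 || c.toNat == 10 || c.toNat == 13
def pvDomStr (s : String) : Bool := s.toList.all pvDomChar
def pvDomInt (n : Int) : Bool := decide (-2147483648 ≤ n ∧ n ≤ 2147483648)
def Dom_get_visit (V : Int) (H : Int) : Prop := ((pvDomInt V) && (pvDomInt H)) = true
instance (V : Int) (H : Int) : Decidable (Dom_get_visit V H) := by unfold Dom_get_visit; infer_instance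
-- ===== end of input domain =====

-- B replaces each of A's bounded break-loops with its arithmetic closed form (simpler, no loops).
-- ===== PORT A =====
-- A's bounded 'for i in range(3)' loop with break, as structural recursion on the remaining iterations
def get_visit_loop (order : Int) : Nat → Int → Int → Int
  | 0, _, cnt => cnt
  | n+1, H, cnt =>
    let H := H - order
    let cnt := cnt + 1
    if H < 0 then cnt - 1 else get_visit_loop order n H cnt

def get_visit (V : Int) (H : Int) : Int :=
  let cnt : Int := 1
  let H := H - 1
  if V ≤ 1 then cnt
  else if V ≤ 2 then get_visit_loop 2 3 H cnt
  else if H ≤ 5 then get_visit_loop 1 3 H cnt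
  else cnt + (H - 4) + 2

-- ===== PORT B =====
def get_visit_alt (V : Int) (H : Int) : Int :=
  let H := H - 1
  if V ≤ 1 then 1
  else if V ≤ 2 then 1 + min 3 (max 0 (PySem.Int.floordiv H 2))
  else if H ≤ 5 then 1 + min 3 (max 0 H)
  else H - 1

-- ===== PRECONDITION & SPEC =====
def Spec_get_visit (V : Int) (H : Int) (out : Int) : Prop := out = get_visit_alt V H
instance (V : Int) (H : Int) (out : Int) : Decidable (Spec_get_visit V H out) := by unfold Spec_get_visit; infer_instance

-- ===== CLAIM (what is proved, stated in full; the proofs are below) =====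
def Claim_equal_get_visit : Prop := ∀ (V : Int) (H : Int), Dom_get_visit V H → Spec_get_visit V H (get_visit V H)

-- ===== LEMMAS AND PROOFS =====

-- ===== VERDICT (by name: the statement is the Claim_ definition above) =====
theorem get_visit_spec : Claim_equal_get_visit := by
  intro V H _
  unfold Spec_get_visit
  simp only [get_visit, get_visit_alt, get_visit_loop, PySem.Int.floordiv]
  have h2 : Int.fdiv (H - 1) 2 = (H - 1) / 2 := by
    rw [Int.fdiv_eq_ediv]; simp
  rw [h2]
  split_ifs <;> omega
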